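-- pv_equiv track=rewrite | github.com/getindata/kedro-airflow-gke-example | src/spaceflights/airflow_utils/airflow_utils.py | get_tasks_from_dependencies
-- ===== SOURCE A (Python) =====
-- from typing import Tuple
--
-- def get_tasks_from_dependencies(node_dependencies: dict, group_translator: dict) -> Tuple[set, dict]:
--     # Calculating graph structure after grouping nodes by grouping tags
--     group_dependencies = {}
--     task_names = set()
--     for parent, children in node_dependencies.items():
--         if group_translator[parent] not in group_dependencies:
--             group_dependencies[group_translator[parent]] = set()
--         this_group_deps = group_dependencies[group_translator[parent]]
--         task_names.add(group_translator[parent])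
--         for child in children:
--             if group_translator[child] != group_translator[parent]:
--                 this_group_deps.add(group_translator[child])
--             task_names.add(group_translator[child])
--     return task_names, group_dependencies
-- ===== SOURCE B (Python) =====
-- def get_tasks_from_dependencies(node_dependencies: dict, group_translator: dict):
--     tr = group_translator
--     # Task names: one flat set over every node occurrence (parent then its children).
--     task_names = {tr[n] for p, cs in node_dependencies.items() for n in (p, *cs)}
--     # Relational pass: flatten the graph to translated (parent_group, child_group)
--     # edges, then build the grouped graph by a group-by over that edge list:
--     # one dict comprehension over the distinct parent groups, each entry collecting
--     # the non-self child groups of its edges.  Parent groups without cross-group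
--     # children get their empty set from the comprehension itself.
--     edges = [(tr[p], tr[c]) for p, cs in node_dependencies.items() for c in cs]
--     parent_groups = dict.fromkeys(tr[p] for p in node_dependencies)
--     group_dependencies = {g: {cg for pg, cg in edges if pg == g and cg != g}
--                           for g in parent_groups}
--     return task_names, group_dependencies
-- ===== Notes on version B (the rewrite author's own statement) =====
-- stated objective: alternative
-- what changed: Replaces A's single-pass incremental dict mutation (setdefault-style entry creation plus in-place set.add per child) by a relational decomposition: flatten the graph once into a translated (parent_group, child_group) edge list, then build the grouped graph as one dict comprehension over the distinct parent groups, each entry a group-by filter over the edge list; task names come from one flat set comprehension.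
import Mathlib
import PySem

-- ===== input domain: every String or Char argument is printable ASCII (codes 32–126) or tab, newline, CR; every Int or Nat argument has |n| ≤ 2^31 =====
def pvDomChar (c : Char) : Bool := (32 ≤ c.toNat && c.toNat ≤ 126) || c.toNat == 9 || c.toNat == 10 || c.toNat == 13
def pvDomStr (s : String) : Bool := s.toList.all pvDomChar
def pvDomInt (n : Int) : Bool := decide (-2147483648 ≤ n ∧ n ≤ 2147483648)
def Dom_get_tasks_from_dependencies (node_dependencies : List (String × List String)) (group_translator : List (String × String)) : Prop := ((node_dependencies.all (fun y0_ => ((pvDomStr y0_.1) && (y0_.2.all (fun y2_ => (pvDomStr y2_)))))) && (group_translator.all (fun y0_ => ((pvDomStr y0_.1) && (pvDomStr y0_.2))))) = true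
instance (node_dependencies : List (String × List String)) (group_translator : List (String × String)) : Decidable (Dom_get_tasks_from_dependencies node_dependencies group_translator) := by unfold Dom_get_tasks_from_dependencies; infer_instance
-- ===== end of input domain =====

-- ===== PORT A =====
-- B differs by decomposition: B flattens the graph to a translated edge list and builds the
-- grouped graph by a group-by comprehension over it, instead of A's single-pass incremental
-- dict mutation; same results, different construction ("alternative", not faster).
-- Shared lookup helper: group_translator[x] (first-match association-list lookup), total with a
-- dummy default; Pre_ guarantees the key is present wherever the Pythons look it up.
def pyTr (group_translator : List (String × String)) (x : String) : String :=
  (group_translator.lookup x).getD ""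

def get_tasks_from_dependencies (node_dependencies : List (String × List String)) (group_translator : List (String × String)) : List String × (List (String × List String)) :=
  let tr := pyTr group_translator
  let res := node_dependencies.foldl
    (fun (st : PySem.Dict String (PySem.Set String) × PySem.Set String) pc =>
      let gd := st.1
      let tn := st.2
      let gp := tr pc.1
      let gd := if gd.contains gp then gd else gd.insert gp PySem.Set.empty
      let deps := gd.getD gp PySem.Set.empty
      let tn := PySem.Set.add tn gp
      let dt := pc.2.foldl
        (fun (dt : PySem.Set String × PySem.Set String) c =>
          ((if tr c ≠ gp then PySem.Set.add dt.1 (tr c) else dt.1),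
           PySem.Set.add dt.2 (tr c)))
        (deps, tn)
      (gd.insert gp dt.1, dt.2))
    (PySem.Dict.empty, PySem.Set.empty)
  (res.2, res.1.items)

-- ===== PORT B =====
def get_tasks_from_dependencies_alt (node_dependencies : List (String × List String)) (group_translator : List (String × String)) : List String × (List (String × List String)) :=
  let tr := pyTr group_translator
  let task_names : PySem.Set String :=
    PySem.Set.ofList ((node_dependencies.flatMap (fun pc => pc.1 :: pc.2)).map tr)
  let edges : List (String × String) :=
    node_dependencies.flatMap (fun pc => pc.2.map (fun c => (tr pc.1, tr c)))
  let parent_groups : List String :=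
    PySem.List.dedup (node_dependencies.map (fun pc => tr pc.1))
  let group_dependencies : List (String × List String) :=
    parent_groups.map (fun g =>
      (g, (PySem.Set.ofList
            ((edges.filter (fun e => e.1 == g && e.2 != g)).map Prod.snd) : List String)))
  (task_names, group_dependencies)

-- ===== PRECONDITION & SPEC =====
-- Pre_: every parent and every child occurs as a key of group_translator — exactly the
-- inputs on which the Python A returns (elsewhere it raises KeyError; B raises there too).
def Pre_get_tasks_from_dependencies (node_dependencies : List (String × List String)) (group_translator : List (String × String)) : Prop :=
  ∀ pc ∈ node_dependencies,
    (group_translator.lookup pc.1).isSome = true ∧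
    ∀ c ∈ pc.2, (group_translator.lookup c).isSome = true
instance (node_dependencies : List (String × List String)) (group_translator : List (String × String)) : Decidable (Pre_get_tasks_from_dependencies node_dependencies group_translator) := by unfold Pre_get_tasks_from_dependencies; infer_instance
def pvWitness_get_tasks_from_dependencies : (List (String × List String)) × (List (String × String)) :=
  ([("a", ["b", "c"]), ("b", [])], [("a", "g1"), ("b", "g2"), ("c", "g1")])

def Spec_get_tasks_from_dependencies (node_dependencies : List (String × List String)) (group_translator : List (String × String)) (out : List String × (List (String × List String))) : Prop := out = get_tasks_from_dependencies_alt node_dependencies group_translator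
instance (node_dependencies : List (String × List String)) (group_translator : List (String × String)) (out : List String × (List (String × List String))) : Decidable (Spec_get_tasks_from_dependencies node_dependencies group_translator out) := by unfold Spec_get_tasks_from_dependencies; infer_instance

-- ===== CLAIM (what is proved, stated in full; the proofs are below) =====
def Claim_equal_get_tasks_from_dependencies : Prop := ∀ (node_dependencies : List (String × List String)) (group_translator : List (String × String)), Dom_get_tasks_from_dependencies node_dependencies group_translator → Pre_get_tasks_from_dependencies node_dependencies group_translator → Spec_get_tasks_from_dependencies node_dependencies group_translator (get_tasks_from_dependencies node_dependencies group_translator)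

-- ===== LEMMAS AND PROOFS =====

-- Folding a conditional add over a list = folding add over the filtered list.
theorem foldl_add_ite_eq_filter (l : List String) (p : String → Bool) (f : String → String)
    (s : PySem.Set String) :
    l.foldl (fun s c => if p c then PySem.Set.add s (f c) else s) s
      = (l.filter p).foldl (fun s c => PySem.Set.add s (f c)) s := by
  induction l generalizing s with
  | nil => rfl
  | cons x xs ih =>
    simp only [List.foldl_cons, List.filter_cons]
    by_cases h : p x = true
    · simp [h, ih]
    · simp [h, ih]

-- A's setdefault-then-read of the dict: the read value ignores the setdefault …
theorem getD_setdefault (gd : PySem.Dict String (PySem.Set String)) (k : String) :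
    ((if gd.contains k then gd else gd.insert k PySem.Set.empty).getD k PySem.Set.empty)
      = gd.getD k PySem.Set.empty := by
  by_cases h : gd.contains k = true
  · simp [h]
  · simp only [h, Bool.false_eq_true, if_false, PySem.Dict.getD_insert_self]
    exact (PySem.Dict.getD_of_not_contains gd PySem.Set.empty (by simpa using h)).symm

-- … and the final overwrite at the same key makes the setdefault invisible.
theorem insert_setdefault (gd : PySem.Dict String (PySem.Set String)) (k : String)
    (v : PySem.Set String) :
    ((if gd.contains k then gd else gd.insert k PySem.Set.empty).insert k v)
      = gd.insert k v := by
  by_cases h : gd.contains k = true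
  · simp [h]
  · simp [h, PySem.Dict.insert_insert_self]

-- One step of A's loop body: a merge-insert dict step paired with the task-name adds.
theorem step_eq (gt : List (String × String))
    (gd : PySem.Dict String (PySem.Set String)) (tn : PySem.Set String)
    (pc : String × List String) :
    (let tr := pyTr gt
     let gp := tr pc.1
     let gd' := if gd.contains gp then gd else gd.insert gp PySem.Set.empty
     let deps := gd'.getD gp PySem.Set.empty
     let tn' := PySem.Set.add tn gp
     let dt := pc.2.foldl
        (fun (dt : PySem.Set String × PySem.Set String) c =>
          ((if tr c ≠ gp then PySem.Set.add dt.1 (tr c) else dt.1),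
           PySem.Set.add dt.2 (tr c)))
        (deps, tn')
     ((gd'.insert gp dt.1, dt.2) : PySem.Dict String (PySem.Set String) × PySem.Set String))
    = (gd.insert (pyTr gt pc.1)
         (PySem.Set.update (gd.getD (pyTr gt pc.1) PySem.Set.empty)
           ((pc.2.filter (fun c => pyTr gt c != pyTr gt pc.1)).map (pyTr gt))),
       ((pc.1 :: pc.2).map (pyTr gt)).foldl PySem.Set.add tn) := by
  simp only
  rw [PySem.List.foldl_prod_mk
        (fun s c => if pyTr gt c ≠ pyTr gt pc.1 then PySem.Set.add s (pyTr gt c) else s)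
        (fun s c => PySem.Set.add s (pyTr gt c)) pc.2]
  rw [getD_setdefault, insert_setdefault]
  refine Prod.ext ?_ ?_
  · simp only
    rw [PySem.Set.update_map_eq_foldl_add,
        ← foldl_add_ite_eq_filter pc.2 (fun c => pyTr gt c != pyTr gt pc.1) (pyTr gt)]
    simp [bne_iff_ne]
  · simp [List.foldl_map]

-- The whole loop: A's paired fold = (merge-insert dict fold, fold of adds over all translated nodes).
theorem loop_eq (nd : List (String × List String)) (gt : List (String × String))
    (gd : PySem.Dict String (PySem.Set String)) (tn : PySem.Set String) :
    nd.foldl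
      (fun (st : PySem.Dict String (PySem.Set String) × PySem.Set String) pc =>
        let tr := pyTr gt
        let gd := st.1
        let tn := st.2
        let gp := tr pc.1
        let gd := if gd.contains gp then gd else gd.insert gp PySem.Set.empty
        let deps := gd.getD gp PySem.Set.empty
        let tn := PySem.Set.add tn gp
        let dt := pc.2.foldl
          (fun (dt : PySem.Set String × PySem.Set String) c =>
            ((if tr c ≠ gp then PySem.Set.add dt.1 (tr c) else dt.1),
             PySem.Set.add dt.2 (tr c)))
          (deps, tn)
        (gd.insert gp dt.1, dt.2))
      (gd, tn)
    = (nd.foldl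
        (fun (gd : PySem.Dict String (PySem.Set String)) pc =>
          let g := pyTr gt pc.1
          gd.insert g (PySem.Set.update (gd.getD g PySem.Set.empty)
            ((pc.2.filter (fun c => pyTr gt c != g)).map (pyTr gt))))
        gd,
       ((nd.flatMap (fun pc => pc.1 :: pc.2)).map (pyTr gt)).foldl PySem.Set.add tn) := by
  induction nd generalizing gd tn with
  | nil => rfl
  | cons pc rest ih =>
    simp only [List.foldl_cons, List.flatMap_cons, List.map_append, List.foldl_append]
    rw [← ih]
    congr 1
    exact step_eq gt gd tn pc

-- getD of the merge-insert fold: the collected payloads of the key's own pairs.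
theorem getD_merge_fold (l : List (String × List String))
    (k : (String × List String) → String) (payload : (String × List String) → List String)
    (d : PySem.Dict String (PySem.Set String)) (g : String) :
    (l.foldl (fun d pc =>
        d.insert (k pc) (PySem.Set.update (d.getD (k pc) PySem.Set.empty) (payload pc))) d).getD
      g PySem.Set.empty
    = PySem.Set.update (d.getD g PySem.Set.empty)
        ((l.filter (fun pc => k pc == g)).flatMap payload) := by
  induction l generalizing d with
  | nil => simp [PySem.Set.update_nil]
  | cons pc rest ih =>
    simp only [List.foldl_cons, List.filter_cons, ih]
    by_cases h : k pc = g
    · subst h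
      simp [PySem.Dict.getD_insert_self, PySem.Set.update_append]
    · have h' : (k pc == g) = false := by simpa using h
      rw [PySem.Dict.getD_insert_of_ne _ _ _ (Ne.symm h)]
      simp [h']

-- Items of a nodup-keyed dict are its keys paired with their getD values.
theorem items_eq_keys_map (d : PySem.Dict String (PySem.Set String))
    (h : d.keys.Nodup) :
    d.items = d.keys.map (fun g => (g, d.getD g PySem.Set.empty)) := by
  have hkm : d.keys.map (fun g => (g, d.getD g PySem.Set.empty))
      = d.items.map (fun p => (p.1, d.getD p.1 PySem.Set.empty)) := by
    simp only [PySem.Dict.keys, List.map_map]; rfl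
  rw [hkm]
  have hcong : d.items.map (fun p => (p.1, d.getD p.1 PySem.Set.empty)) = d.items.map id := by
    refine List.map_congr_left ?_
    intro p hp
    obtain ⟨a, b⟩ := p
    have hv : d.getD a PySem.Set.empty = b := PySem.Dict.getD_of_mem_items d hp h _
    simp only [id]
    exact Prod.ext rfl hv
  simpa using hcong.symm

-- The group-by over edges for one group g = the merged payloads of g's own pairs.
theorem edges_filter_eq (nd : List (String × List String)) (tr : String → String) (g : String) :
    ((nd.flatMap (fun pc => pc.2.map (fun c => (tr pc.1, tr c)))).filter
        (fun e => e.1 == g && e.2 != g)).map Prod.snd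
      = ((nd.filter (fun pc => tr pc.1 == g)).flatMap
          (fun pc => (pc.2.filter (fun c => tr c != tr pc.1)).map tr)) := by
  induction nd with
  | nil => rfl
  | cons pc rest ih =>
    simp only [List.flatMap_cons, List.filter_append, List.map_append, List.filter_cons, ih]
    by_cases h : tr pc.1 = g
    · subst h
      simp [List.filter_map, Function.comp_def, List.flatMap_cons]
    · have h' : (tr pc.1 == g) = false := by simpa using h
      simp [List.filter_map, Function.comp_def, h']

-- ===== VERDICT (by name: the statement is the Claim_ definition above) =====
theorem get_tasks_from_dependencies_spec : Claim_equal_get_tasks_from_dependencies := by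
  intro nd gt _ _
  unfold Spec_get_tasks_from_dependencies
  unfold get_tasks_from_dependencies get_tasks_from_dependencies_alt
  simp only
  rw [loop_eq nd gt PySem.Dict.empty PySem.Set.empty]
  refine Prod.ext rfl ?_
  simp only
  set tr := pyTr gt with htr
  set F := fun (gd : PySem.Dict String (PySem.Set String)) (pc : String × List String) =>
      gd.insert (tr pc.1) (PySem.Set.update (gd.getD (tr pc.1) PySem.Set.empty)
        ((pc.2.filter (fun c => tr c != tr pc.1)).map tr)) with hF
  have hkeys : (nd.foldl F PySem.Dict.empty).keys
      = PySem.Set.ofList (nd.map (fun pc => tr pc.1)) := by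
    rw [hF]
    rw [PySem.Dict.keys_foldl_insert_key nd (fun pc => tr pc.1) _ PySem.Dict.empty]
    simp [PySem.Dict.keys_empty, PySem.Set.update_nil_left]
  have hnodup : (nd.foldl F PySem.Dict.empty).keys.Nodup := by
    rw [hkeys]; exact PySem.Set.nodup_ofList _
  rw [items_eq_keys_map _ hnodup, hkeys, PySem.List.dedup_eq_ofList]
  refine List.map_congr_left ?_
  intro g _
  rw [hF, getD_merge_fold nd (fun pc => tr pc.1)
        (fun pc => (pc.2.filter (fun c => tr c != tr pc.1)).map tr) PySem.Dict.empty g]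
  rw [edges_filter_eq nd tr g]
  simp [PySem.Dict.getD_empty, PySem.Set.update_nil_left]
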